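-- pv_equiv track=rewrite | github.com/grahamaloo/cse415 | a5/Bobby_BC_Player.py | freezer_search
-- ===== SOURCE A (Python) =====
-- INIT_TO_CODE = {'p': 2, 'P': 3, 'c': 4, 'C': 5, 'l': 6, 'L': 7, 'i': 8, 'I': 9,
--                 'w': 10, 'W': 11, 'k': 12, 'K': 13, 'f': 14, 'F': 15, '-': 0}
--
-- def who(piece): return piece % 2
--
-- def freezer_search(board, whose_move):
--     frozen = [[],[]]
--     for x in range(0, len(board)):
--         for y in range(0, len(board[x])):
--             if board[x][y] - who(board[x][y]) == INIT_TO_CODE['f']: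
--                 for i, j in vec:
--                     if x+i >= 0 and y+j >= 0 and x+i <= 7 and y+j <= 7:
--                         frozen[who(board[x][y])].append((x+i, y+j))
--     return frozen
--
-- vec = [(0,1), (0,-1), (1,0), (-1,0), (1,1), (-1,-1), (1,-1), (-1,1)]
-- ===== SOURCE B (Python) =====
-- vec = [(0,1), (0,-1), (1,0), (-1,0), (1,1), (-1,-1), (1,-1), (-1,1)]
--
-- def freezer_search(board, whose_move):
--     # A piece code c satisfies c - c % 2 == 14 exactly when c is 14 or 15
--     # (the white/black freezer codes), and its owner is then c - 14.
--     # So build each owner's list by an independent comprehension keyed on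
--     # the literal freezer code, instead of one scan dispatching by parity.
--     def squares(code):
--         return [(x + i, y + j)
--                 for x, row in enumerate(board)
--                 for y, v in enumerate(row)
--                 if v == code
--                 for i, j in vec
--                 if 0 <= x + i <= 7 and 0 <= y + j <= 7]
--     return [squares(14), squares(15)]
-- ===== Notes on version B (the rewrite author's own statement) =====
-- stated objective: simpler
-- what changed: B replaces A's single mutating scan that computes a parity and dispatches appends into frozen[parity] by two independent filter-and-expand comprehensions keyed on the literal freezer codes 14 and 15 (using that c - c%2 == 14 iff c is 14 or 15, with owner c - 14), so no parity arithmetic, no mutation and no dispatch remain.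
import Mathlib
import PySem

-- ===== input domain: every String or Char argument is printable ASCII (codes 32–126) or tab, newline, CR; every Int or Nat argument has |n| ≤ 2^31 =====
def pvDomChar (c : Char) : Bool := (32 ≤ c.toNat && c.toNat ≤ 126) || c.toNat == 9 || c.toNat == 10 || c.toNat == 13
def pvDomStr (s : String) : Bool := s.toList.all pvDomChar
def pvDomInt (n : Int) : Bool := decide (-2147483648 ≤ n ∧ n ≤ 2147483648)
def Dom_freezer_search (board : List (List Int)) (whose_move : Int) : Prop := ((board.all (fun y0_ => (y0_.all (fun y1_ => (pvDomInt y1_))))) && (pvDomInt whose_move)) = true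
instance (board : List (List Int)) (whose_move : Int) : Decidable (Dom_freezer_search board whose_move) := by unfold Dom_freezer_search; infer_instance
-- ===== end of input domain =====

-- B builds each owner's list by an independent filter-and-expand comprehension keyed on the
-- literal freezer codes 14/15 (c - c%2 == 14 iff c ∈ {14,15}), instead of A's single mutating
-- scan dispatching by parity; objective: simpler, same cost.

-- ===== PORT A =====
-- the pair (frozen[0], frozen[1]); the returned list is [frozen[0], frozen[1]]
abbrev pvSt : Type := List (Int × Int) × List (Int × Int)

def pvWho (piece : Int) : Int := PySem.Int.mod piece 2

-- the module-level `vec` both files read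
def pvVec : List (Int × Int) := [(0,1), (0,-1), (1,0), (-1,0), (1,1), (-1,-1), (1,-1), (-1,1)]

-- body of A's innermost `for i, j in vec:` loop (append to frozen[who(board[x][y])] when in bounds)
def pvAStep (x y v : Int) (fr : pvSt) (ij : Int × Int) : pvSt :=
  if x + ij.1 ≥ 0 ∧ y + ij.2 ≥ 0 ∧ x + ij.1 ≤ 7 ∧ y + ij.2 ≤ 7 then
    if pvWho v = 0 then (fr.1 ++ [(x + ij.1, y + ij.2)], fr.2)
    else (fr.1, fr.2 ++ [(x + ij.1, y + ij.2)])
  else fr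

-- indices produced by range(len(...)) are always in range, so pyGetD is exact for board[x][y]
def freezer_search (board : List (List Int)) (whose_move : Int) : List (List (Int × Int)) :=
  let fr : pvSt :=
    (PySem.List.pyRange 0 (PySem.List.len board)).foldl (fun fr x =>
      let row := PySem.List.pyGetD board x []
      (PySem.List.pyRange 0 (PySem.List.len row)).foldl (fun fr y =>
        let v := PySem.List.pyGetD row y 0
        if v - pvWho v = 14 then pvVec.foldl (pvAStep x y v) fr else fr) fr) ([], [])
  [fr.1, fr.2]

-- ===== PORT B =====
-- the innermost `for i, j in vec: if 0 <= x+i <= 7 and 0 <= y+j <= 7` clause of the comprehension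
def pvNbr (x y : Int) (ij : Int × Int) : List (Int × Int) :=
  if 0 ≤ x + ij.1 ∧ x + ij.1 ≤ 7 ∧ 0 ≤ y + ij.2 ∧ y + ij.2 ≤ 7 then
    [(x + ij.1, y + ij.2)] else []

-- Source B's helper `squares(code)`: the whole comprehension
def pvSquares (board : List (List Int)) (code : Int) : List (Int × Int) :=
  (PySem.List.enumerate board).flatMap (fun xr =>
    (PySem.List.enumerate xr.2).flatMap (fun yv =>
      if yv.2 = code then pvVec.flatMap (pvNbr xr.1 yv.1) else []))

def freezer_search_alt (board : List (List Int)) (whose_move : Int) : List (List (Int × Int)) :=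
  [pvSquares board 14, pvSquares board 15]

-- ===== PRECONDITION & SPEC =====
def Spec_freezer_search (board : List (List Int)) (whose_move : Int) (out : List (List (Int × Int))) : Prop := out = freezer_search_alt board whose_move
instance (board : List (List Int)) (whose_move : Int) (out : List (List (Int × Int))) : Decidable (Spec_freezer_search board whose_move out) := by unfold Spec_freezer_search; infer_instance

-- ===== CLAIM (what is proved, stated in full; the proofs are below) =====
def Claim_equal_freezer_search : Prop := ∀ (board : List (List Int)) (whose_move : Int), Dom_freezer_search board whose_move → Spec_freezer_search board whose_move (freezer_search board whose_move)

-- ===== LEMMAS AND PROOFS =====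


-- fold with a pairwise-append step = the two flatMaps, componentwise
theorem pv_prod_append {β : Type} (F G : β → List (Int × Int)) (l : List β)
    (a b : List (Int × Int)) :
    List.foldl (fun (fr : pvSt) e => (fr.1 ++ F e, fr.2 ++ G e)) (a, b) l
      = (a ++ l.flatMap F, b ++ l.flatMap G) := by
  induction l generalizing a b with
  | nil => simp
  | cons e l ih =>
    simp only [List.foldl_cons, List.flatMap_cons]
    rw [ih]
    simp

-- A's inner vec-fold when the cell's owner is 0: everything lands in frozen[0], in pvNbr order
theorem pv_inner0 (x y v : Int) (h : pvWho v = 0) :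
    ∀ (L : List (Int × Int)) (fr : pvSt),
      L.foldl (pvAStep x y v) fr = (fr.1 ++ L.flatMap (pvNbr x y), fr.2) := by
  intro L
  induction L with
  | nil => intro fr; simp
  | cons a L ih =>
    intro fr
    simp only [List.foldl_cons, List.flatMap_cons]
    rw [ih]
    simp only [pvAStep, pvNbr, h]
    by_cases hb : x + a.1 ≥ 0 ∧ y + a.2 ≥ 0 ∧ x + a.1 ≤ 7 ∧ y + a.2 ≤ 7
    · rw [if_pos hb, if_pos (by omega : 0 ≤ x + a.1 ∧ x + a.1 ≤ 7 ∧ 0 ≤ y + a.2 ∧ y + a.2 ≤ 7)]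
      simp
    · rw [if_neg hb, if_neg (by omega : ¬(0 ≤ x + a.1 ∧ x + a.1 ≤ 7 ∧ 0 ≤ y + a.2 ∧ y + a.2 ≤ 7))]
      simp

-- A's inner vec-fold when the cell's owner is 1: everything lands in frozen[1]
theorem pv_inner1 (x y v : Int) (h : pvWho v = 1) :
    ∀ (L : List (Int × Int)) (fr : pvSt),
      L.foldl (pvAStep x y v) fr = (fr.1, fr.2 ++ L.flatMap (pvNbr x y)) := by
  intro L
  induction L with
  | nil => intro fr; simp
  | cons a L ih =>
    intro fr
    simp only [List.foldl_cons, List.flatMap_cons]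
    rw [ih]
    simp only [pvAStep, pvNbr, h]
    by_cases hb : x + a.1 ≥ 0 ∧ y + a.2 ≥ 0 ∧ x + a.1 ≤ 7 ∧ y + a.2 ≤ 7
    · rw [if_pos hb, if_pos (by omega : 0 ≤ x + a.1 ∧ x + a.1 ≤ 7 ∧ 0 ≤ y + a.2 ∧ y + a.2 ≤ 7)]
      simp
    · rw [if_neg hb, if_neg (by omega : ¬(0 ≤ x + a.1 ∧ x + a.1 ≤ 7 ∧ 0 ≤ y + a.2 ∧ y + a.2 ≤ 7))]
      simp

-- one cell of A's scan, rewritten as independent appends of B's two per-code contributions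
theorem pv_cell (x y v : Int) (fr : pvSt) :
    (if v - pvWho v = 14 then pvVec.foldl (pvAStep x y v) fr else fr)
    = (fr.1 ++ (if v = 14 then pvVec.flatMap (pvNbr x y) else []),
       fr.2 ++ (if v = 15 then pvVec.flatMap (pvNbr x y) else [])) := by
  by_cases h14 : v = 14
  · subst h14
    rw [if_pos (by decide : (14:Int) - pvWho 14 = 14), pv_inner0 x y 14 (by decide)]
    simp
  · by_cases h15 : v = 15
    · subst h15
      rw [if_pos (by decide : (15:Int) - pvWho 15 = 14), pv_inner1 x y 15 (by decide)]
      simp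
    · have hm : pvWho v = v % 2 := PySem.Int.mod_eq_emod_of_pos (by norm_num)
      rw [if_neg (by omega : ¬(v - pvWho v = 14)), if_neg h14, if_neg h15]
      simp

-- one row of A's scan, as appends of B's per-code row contributions (enumerate-indexed)
theorem pv_row (x : Int) (row : List Int) (a b : List (Int × Int)) :
    (PySem.List.pyRange 0 (PySem.List.len row)).foldl (fun fr y =>
        let v := PySem.List.pyGetD row y 0
        if v - pvWho v = 14 then pvVec.foldl (pvAStep x y v) fr else fr) (a, b)
    = (a ++ (PySem.List.enumerate row).flatMap (fun yv =>
          if yv.2 = 14 then pvVec.flatMap (pvNbr x yv.1) else []),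
       b ++ (PySem.List.enumerate row).flatMap (fun yv =>
          if yv.2 = 15 then pvVec.flatMap (pvNbr x yv.1) else [])) := by
  rw [PySem.List.enumerate_eq_map_pyRange row 0, List.flatMap_map, List.flatMap_map]
  rw [List.foldl_ext _ (fun (fr : pvSt) y =>
        (fr.1 ++ (if PySem.List.pyGetD row y 0 = 14 then pvVec.flatMap (pvNbr x y) else []),
         fr.2 ++ (if PySem.List.pyGetD row y 0 = 15 then pvVec.flatMap (pvNbr x y) else [])))
        (a, b) (fun fr y _ => pv_cell x y (PySem.List.pyGetD row y 0) fr)]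
  rw [pv_prod_append]

-- the whole board: A's fold equals B's two comprehensions
theorem pv_main (board : List (List Int)) (whose_move : Int) :
    freezer_search board whose_move = freezer_search_alt board whose_move := by
  simp only [freezer_search, freezer_search_alt, pvSquares]
  rw [PySem.List.enumerate_eq_map_pyRange board [], List.flatMap_map, List.flatMap_map]
  rw [List.foldl_ext _ (fun (fr : pvSt) x =>
        (fr.1 ++ (PySem.List.enumerate (PySem.List.pyGetD board x [])).flatMap (fun yv =>
            if yv.2 = 14 then pvVec.flatMap (pvNbr x yv.1) else []),
         fr.2 ++ (PySem.List.enumerate (PySem.List.pyGetD board x [])).flatMap (fun yv =>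
            if yv.2 = 15 then pvVec.flatMap (pvNbr x yv.1) else [])))
        (([], []) : pvSt)
        (fun fr x _ => by obtain ⟨a, b⟩ := fr; exact pv_row x (PySem.List.pyGetD board x []) a b)]
  rw [pv_prod_append]
  simp

-- ===== VERDICT (by name: the statement is the Claim_ definition above) =====
theorem freezer_search_spec : Claim_equal_freezer_search := by
  intro board whose_move _
  unfold Spec_freezer_search
  exact pv_main board whose_move
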